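-- pv_equiv track=rewrite | github.com/Nyanyan/Reversi | adjust_pattern_hand.py | create_nums
-- ===== SOURCE A (Python) =====
-- def create_nums(s, idx):
--     if idx == len(s):
--         return [0]
--     if s[idx] == '0':
--         return create_nums(s, idx + 1)
--     elif s[idx] == '1':
--         res = []
--         for i in create_nums(s, idx + 1):
--             res.append(i + 3 ** (len(s) - 1 - idx))
--         return res
--     elif s[idx] == '2':
--         res = []
--         for i in create_nums(s, idx + 1):
--             res.append(i + 2 * (3 ** (len(s) - 1 - idx)))
--         return res
--     else:
--         res = []
--         for i in create_nums(s, idx + 1):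
--             res.append(i)
--             res.append(i + 3 ** (len(s) - 1 - idx))
--             res.append(i + 2 * (3 ** (len(s) - 1 - idx)))
--         return res
-- ===== SOURCE B (Python) =====
-- def create_nums(s, idx):
--     res = [0]
--     for p in range(len(s) - 1, idx - 1, -1):
--         w = 3 ** (len(s) - 1 - p)
--         c = s[p]
--         if c == '0':
--             pass
--         elif c == '1':
--             res = [i + w for i in res]
--         elif c == '2':
--             res = [i + 2 * w for i in res]
--         else:
--             res = [x for i in res for x in (i, i + w, i + 2 * w)]
--     return res
-- ===== Notes on version B (the rewrite author's own statement) =====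
-- stated objective: alternative
-- what changed: Replaces A's recursion over the string suffix (each level re-walking the sublist with append loops) by a single iterative fold: res starts as [0] and positions are processed right-to-left in one loop using map/flat-map comprehensions.
import Mathlib
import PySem

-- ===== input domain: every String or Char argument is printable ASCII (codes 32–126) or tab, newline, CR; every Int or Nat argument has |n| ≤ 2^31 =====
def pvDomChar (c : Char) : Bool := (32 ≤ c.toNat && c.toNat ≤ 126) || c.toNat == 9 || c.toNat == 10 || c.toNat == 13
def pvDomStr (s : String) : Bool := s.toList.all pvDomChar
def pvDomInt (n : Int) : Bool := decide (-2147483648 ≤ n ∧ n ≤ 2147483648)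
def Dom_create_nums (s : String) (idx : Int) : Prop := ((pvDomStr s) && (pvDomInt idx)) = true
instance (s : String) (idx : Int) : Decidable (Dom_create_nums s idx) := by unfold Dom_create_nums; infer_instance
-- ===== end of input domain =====

-- B replaces A's recursion over the suffix by a single iterative right-to-left fold that
-- rewrites one result list in place (objective: alternative decomposition, same cost).

-- ===== PORT A =====
-- termination helper for the port's recursion (cited in decreasing_by)
theorem pvGetLt_create_nums (s : String) (i : Int) (c : Char)
    (h : PySem.Str.pyGet? s i = some c) : i < (s.toList.length : Int) := by
  rw [PySem.Str.pyGet?_eq, PySem.Chars.pyGet?_eq_listPyGet?] at h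
  have hne : PySem.List.pyGet? s.toList i ≠ none := by simp [h]
  by_contra hge
  exact hne ((PySem.List.pyGet?_eq_none_iff _ _).2 (fun hr => hge hr.2))

def create_nums (s : String) (idx : Int) : List Int :=
  if idx = PySem.Str.len s then [0]
  else
    match h : PySem.Str.pyGet? s idx with
    | none => []   -- Python raises IndexError here (outside Pre_)
    | some c =>
      if c = '0' then create_nums s (idx + 1)
      else if c = '1' then
        (create_nums s (idx + 1)).foldl
          (fun res i => res ++ [i + 3 ^ (PySem.Str.len s - 1 - idx).toNat]) []
      else if c = '2' then
        (create_nums s (idx + 1)).foldl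
          (fun res i => res ++ [i + 2 * 3 ^ (PySem.Str.len s - 1 - idx).toNat]) []
      else
        (create_nums s (idx + 1)).foldl
          (fun res i =>
            ((res ++ [i]) ++ [i + 3 ^ (PySem.Str.len s - 1 - idx).toNat])
              ++ [i + 2 * 3 ^ (PySem.Str.len s - 1 - idx).toNat]) []
termination_by ((PySem.Str.len s : Int) - idx).toNat
decreasing_by
  all_goals
    have := pvGetLt_create_nums s idx c h
    simp only [PySem.Str.len_eq] at *
    omega

-- ===== PORT B =====
def create_nums_alt (s : String) (idx : Int) : List Int :=
  (PySem.List.pyRange (PySem.Str.len s - 1) (idx - 1) (-1)).foldl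
    (fun res p =>
      let w : Int := 3 ^ (PySem.Str.len s - 1 - p).toNat
      match PySem.Str.pyGet? s p with
      | none => res   -- Python raises IndexError here (outside Pre_)
      | some c =>
        if c = '0' then res
        else if c = '1' then res.map (fun i => i + w)
        else if c = '2' then res.map (fun i => i + 2 * w)
        else res.flatMap (fun i => [i, i + w, i + 2 * w]))
    [0]

-- ===== PRECONDITION & SPEC =====
-- Pre_ excludes exactly the inputs where Python A raises IndexError: idx outside [-len(s), len(s)].
def Pre_create_nums (s : String) (idx : Int) : Prop :=
  -PySem.Str.len s ≤ idx ∧ idx ≤ PySem.Str.len s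
instance (s : String) (idx : Int) : Decidable (Pre_create_nums s idx) := by
  unfold Pre_create_nums; infer_instance

def pvWitness_create_nums : String × Int := ("1*2", 0)

def Spec_create_nums (s : String) (idx : Int) (out : List Int) : Prop := out = create_nums_alt s idx
instance (s : String) (idx : Int) (out : List Int) : Decidable (Spec_create_nums s idx out) := by unfold Spec_create_nums; infer_instance

-- ===== CLAIM (what is proved, stated in full; the proofs are below) =====
def Claim_equal_create_nums : Prop := ∀ (s : String) (idx : Int), Dom_create_nums s idx → Pre_create_nums s idx → Spec_create_nums s idx (create_nums s idx)


-- ===== LEMMAS AND PROOFS =====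

-- B's loop body applied once
def pvStep (s : String) (res : List Int) (p : Int) : List Int :=
  let w : Int := 3 ^ (PySem.Str.len s - 1 - p).toNat
  match PySem.Str.pyGet? s p with
  | none => res
  | some c =>
    if c = '0' then res
    else if c = '1' then res.map (fun i => i + w)
    else if c = '2' then res.map (fun i => i + 2 * w)
    else res.flatMap (fun i => [i, i + w, i + 2 * w])

theorem pvAlt_eq_foldl (s : String) (idx : Int) :
    create_nums_alt s idx
      = (PySem.List.pyRange (PySem.Str.len s - 1) (idx - 1) (-1)).foldl (pvStep s) [0] := rfl

-- splitting the countdown range at its last element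
theorem pvRange_snoc (a b : Int) (h : b < a) :
    PySem.List.pyRange (a - 1) (b - 1) (-1)
      = PySem.List.pyRange (a - 1) b (-1) ++ [b] := by
  rw [PySem.List.pyRange_neg_one_eq_reverse, PySem.List.pyRange_neg_one_eq_reverse]
  have h1 : (b - 1) + 1 = b := by ring
  have h2 : (a - 1) + 1 = a := by ring
  rw [h1, h2, PySem.List.pyRange_one_cons h]
  simp

-- one step of B's fold equals one unfolding of A
-- unfolding A once when the index is valid
theorem pvA_eq_some (s : String) (idx : Int) (c : Char)
    (hne : ¬ idx = PySem.Str.len s) (hc : PySem.Str.pyGet? s idx = some c) :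
    create_nums s idx =
      (if c = '0' then create_nums s (idx + 1)
      else if c = '1' then
        (create_nums s (idx + 1)).foldl
          (fun res i => res ++ [i + 3 ^ (PySem.Str.len s - 1 - idx).toNat]) []
      else if c = '2' then
        (create_nums s (idx + 1)).foldl
          (fun res i => res ++ [i + 2 * 3 ^ (PySem.Str.len s - 1 - idx).toNat]) []
      else
        (create_nums s (idx + 1)).foldl
          (fun res i =>
            ((res ++ [i]) ++ [i + 3 ^ (PySem.Str.len s - 1 - idx).toNat])
              ++ [i + 2 * 3 ^ (PySem.Str.len s - 1 - idx).toNat]) []) := by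
  rw [create_nums]
  simp only [hne, if_false]
  split
  · next heq => rw [hc] at heq; simp at heq
  · next c2 heq =>
    rw [hc] at heq
    injection heq with hcc
    subst hcc
    rfl

theorem pvStep_eq (s : String) (idx : Int)
    (h1 : -PySem.Str.len s ≤ idx) (h2 : idx < PySem.Str.len s) :
    pvStep s (create_nums s (idx + 1)) idx = create_nums s idx := by
  have hne : ¬ idx = PySem.Str.len s := by omega
  obtain ⟨c, hc⟩ : ∃ c, PySem.Str.pyGet? s idx = some c := by
    rw [← Option.ne_none_iff_exists', PySem.Str.pyGet?_eq,
        PySem.Chars.pyGet?_eq_listPyGet?, Ne, PySem.List.pyGet?_eq_none_iff,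
        not_not]
    constructor <;> (simp only [← PySem.Str.len_eq]; omega)
  rw [pvA_eq_some s idx c hne hc]
  simp only [pvStep, hc]
  by_cases h0 : c = '0'
  · simp [h0]
  by_cases hc1 : c = '1'
  · simp only [hc1, if_true]
    rw [PySem.List.foldl_append_singleton_eq_map]
    simp
  by_cases hc2 : c = '2'
  · simp only [hc2, if_true]
    rw [PySem.List.foldl_append_singleton_eq_map
          (fun i => i + 2 * 3 ^ (PySem.Str.len s - 1 - idx).toNat)]
    simp
  · simp only [h0, hc1, hc2, if_false]
    have hf : (fun (res : List Int) (i : Int) =>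
        ((res ++ [i]) ++ [i + 3 ^ (PySem.Str.len s - 1 - idx).toNat])
          ++ [i + 2 * 3 ^ (PySem.Str.len s - 1 - idx).toNat])
        = (fun (res : List Int) (i : Int) =>
        res ++ [i, i + 3 ^ (PySem.Str.len s - 1 - idx).toNat,
                i + 2 * 3 ^ (PySem.Str.len s - 1 - idx).toNat]) := by
      funext res i; simp
    rw [hf, PySem.List.foldl_append_eq_flatMap]
    simp

-- main invariant: the fold from the right end down to idx computes A
theorem pvMain (s : String) (n : Nat) (idx : Int)
    (h1 : -PySem.Str.len s ≤ idx) (h2 : idx ≤ PySem.Str.len s)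
    (hn : (PySem.Str.len s - idx).toNat = n) :
    (PySem.List.pyRange (PySem.Str.len s - 1) (idx - 1) (-1)).foldl (pvStep s) [0]
      = create_nums s idx := by
  induction n generalizing idx with
  | zero =>
    have hidx : idx = PySem.Str.len s := by omega
    subst hidx
    rw [PySem.List.pyRange_neg_one_eq_nil (by omega)]
    rw [create_nums]
    simp
  | succ n ih =>
    have hlt : idx < PySem.Str.len s := by omega
    have hih := ih (idx + 1) (by omega) (by omega) (by omega)
    rw [show idx + 1 - 1 = idx from by ring] at hih
    rw [pvRange_snoc _ _ hlt, List.foldl_append, hih]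
    simp only [List.foldl_cons, List.foldl_nil]
    exact pvStep_eq s idx h1 hlt

-- ===== VERDICT (by name: the statement is the Claim_ definition above) =====
theorem create_nums_spec : Claim_equal_create_nums := by
  intro s idx _ hpre
  unfold Spec_create_nums
  rw [pvAlt_eq_foldl,
      pvMain s (PySem.Str.len s - idx).toNat idx hpre.1 hpre.2 rfl]
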